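-- pv_equiv track=rewrite | github.com/YuewanSun/IDETC2025_Hackathon_SIDI_X-team | keywords_process.py | detect_question_column
-- ===== SOURCE A (Python) =====
-- from typing import List, Dict, Any
--
-- def detect_question_column(cols: List[str]) -> str:
--     # Prefer exact 'question', else first column containing 'question'
--     for c in cols:
--         if c.lower() == "question":
--             return c
--     for c in cols:
--         if "question" in c.lower():
--             return c
--     # common fallbacks
--     for cand in ["prompt", "input", "query", "text"]:
--         for c in cols:
--             if c.lower() == cand:
--                 return c
--     # if nothing obvious, default to the first column
--     return cols[0]
-- ===== SOURCE B (Python) =====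
-- def detect_question_column(cols):
--     cands = ["prompt", "input", "query", "text"]
--     def prio(c):
--         l = c.lower()
--         if l == "question":
--             return 0
--         if "question" in l:
--             return 1
--         if l in cands:
--             return 2 + cands.index(l)
--         return 6
--     return min(cols, key=prio)
-- ===== Notes on version B (the rewrite author's own statement) =====
-- stated objective: alternative
-- what changed: Replaces A's three sequential scans (exact match, substring match, four fallback candidates each scanned separately) by a single stable min over the columns with a numeric priority key; Pre_ excludes the empty list, on which A raises IndexError (B raises ValueError).
import Mathlib
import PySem

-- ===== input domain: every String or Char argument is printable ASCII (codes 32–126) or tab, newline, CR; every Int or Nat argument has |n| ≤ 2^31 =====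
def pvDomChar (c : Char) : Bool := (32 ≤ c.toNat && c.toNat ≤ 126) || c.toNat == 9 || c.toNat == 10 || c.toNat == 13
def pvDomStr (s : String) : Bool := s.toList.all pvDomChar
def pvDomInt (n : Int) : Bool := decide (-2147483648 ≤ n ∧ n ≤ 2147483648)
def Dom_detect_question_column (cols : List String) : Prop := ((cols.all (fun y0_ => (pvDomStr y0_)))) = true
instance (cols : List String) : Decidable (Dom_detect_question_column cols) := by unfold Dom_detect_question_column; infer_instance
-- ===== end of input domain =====

-- B replaces A's three sequential scans by one stable min over a numeric priority key (objective: alternative decomposition).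

-- ===== PORT A =====
def detect_question_column (cols : List String) : String :=
  match cols.find? (fun c => PySem.Str.lower c == "question") with
  | some c => c
  | none =>
    match cols.find? (fun c => PySem.Str.isIn "question" (PySem.Str.lower c)) with
    | some c => c
    | none =>
      match ["prompt", "input", "query", "text"].findSome?
          (fun cand => cols.find? (fun c => PySem.Str.lower c == cand)) with
      | some c => c
      | none =>
        -- cols[0]; on [] Python raises IndexError (excluded by Pre_)
        match cols with
        | [] => ""
        | c :: _ => c

-- ===== PORT B =====
def pvCands : List String := ["prompt", "input", "query", "text"]

def pvPrio (c : String) : Nat :=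
  let l := PySem.Str.lower c
  if l == "question" then 0
  else if PySem.Str.isIn "question" l then 1
  else
    match PySem.List.index? pvCands l with
    | some i => 2 + i
    | none => 6

def detect_question_column_alt (cols : List String) : String :=
  -- min(cols, key=prio); on [] Python raises ValueError (excluded by Pre_)
  (PySem.List.min? cols pvPrio).getD ""

-- ===== PRECONDITION & SPEC =====
-- Pre_ excludes exactly the empty list, on which A raises IndexError (and B raises ValueError).
def Pre_detect_question_column (cols : List String) : Prop := cols ≠ []
instance (cols : List String) : Decidable (Pre_detect_question_column cols) := by
  unfold Pre_detect_question_column; infer_instance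
def pvWitness_detect_question_column : List String := ["id", "Question", "text"]

def Spec_detect_question_column (cols : List String) (out : String) : Prop := out = detect_question_column_alt cols
instance (cols : List String) (out : String) : Decidable (Spec_detect_question_column cols out) := by unfold Spec_detect_question_column; infer_instance

-- ===== CLAIM (what is proved, stated in full; the proofs are below) =====
def Claim_equal_detect_question_column : Prop := ∀ (cols : List String), Dom_detect_question_column cols → Pre_detect_question_column cols → Spec_detect_question_column cols (detect_question_column cols)

-- ===== LEMMAS AND PROOFS =====

def pvM (cols : List String) : Nat := (cols.map pvPrio).foldr min 7

theorem pvPrio_eq (c : String) : pvPrio c =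
    (if PySem.Str.lower c == "question" then 0
     else if PySem.Str.isIn "question" (PySem.Str.lower c) then 1
     else
       match PySem.List.index? pvCands (PySem.Str.lower c) with
       | some i => 2 + i
       | none => 6) := rfl

theorem pvPrio_le (c : String) : pvPrio c ≤ 6 := by
  rw [pvPrio_eq]
  split_ifs with h1 h2
  · omega
  · omega
  · cases hidx : PySem.List.index? pvCands (PySem.Str.lower c) with
    | none => simp
    | some i =>
      obtain ⟨hk, -, -⟩ := PySem.List.getElem_of_index?_eq_some hidx
      have : i < 4 := by simpa [pvCands] using hk
      show 2 + i ≤ 6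
      omega

theorem pvM_cons (c : String) (t : List String) : pvM (c :: t) = min (pvPrio c) (pvM t) := by
  simp [pvM]

theorem pvM_nil : pvM [] = 7 := rfl

theorem pvM_le (cols : List String) : ∀ x ∈ cols, pvM cols ≤ pvPrio x := by
  induction cols with
  | nil => simp
  | cons c t ih =>
    intro x hx
    rw [pvM_cons]
    rcases List.mem_cons.mp hx with rfl | hx
    · omega
    · have := ih x hx; omega

theorem pvM_attained (cols : List String) (h : cols ≠ []) : ∃ x ∈ cols, pvPrio x = pvM cols := by
  induction cols with
  | nil => simp at h
  | cons c t ih =>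
    by_cases ht : t = []
    · subst ht
      refine ⟨c, by simp, ?_⟩
      rw [pvM_cons, pvM_nil]
      have := pvPrio_le c; omega
    · obtain ⟨x, hx, hpx⟩ := ih ht
      by_cases hc : pvPrio c ≤ pvM t
      · exact ⟨c, by simp, by rw [pvM_cons]; omega⟩
      · exact ⟨x, by simp [hx], by rw [pvM_cons]; omega⟩

theorem pvFind_congr_mem {α : Type} (l : List α) (f g : α → Bool)
    (h : ∀ x ∈ l, f x = g x) : l.find? f = l.find? g := by
  induction l with
  | nil => rfl
  | cons a t ih =>
    simp only [List.find?_cons]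
    rw [h a (by simp)]
    cases g a <;> simp [ih (fun x hx => h x (by simp [hx]))]
theorem pvPrio_eq_zero_iff (c : String) :
    (PySem.Str.lower c == "question") = true ↔ pvPrio c = 0 := by
  rw [pvPrio_eq]
  constructor
  · intro h; simp [h]
  · intro h
    by_contra hne
    rw [Bool.not_eq_true] at hne
    rw [if_neg (by simp [hne])] at h
    split_ifs at h
    cases hidx : PySem.List.index? pvCands (PySem.Str.lower c) with
    | none => rw [hidx] at h; change (6 : Nat) = 0 at h; omega
    | some i => rw [hidx] at h; change 2 + i = 0 at h; omega

theorem pvPrio_le_one_iff (c : String) :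
    PySem.Str.isIn "question" (PySem.Str.lower c) = true ↔ pvPrio c ≤ 1 := by
  rw [pvPrio_eq]
  constructor
  · intro h
    split_ifs <;> omega
  · intro h
    split_ifs at h with h1 h2
    · have he : PySem.Str.lower c = "question" := by simpa using h1
      rw [he]; decide
    · exact h2
    · cases hidx : PySem.List.index? pvCands (PySem.Str.lower c) with
      | none => rw [hidx] at h; change (6 : Nat) ≤ 1 at h; omega
      | some i => rw [hidx] at h; change 2 + i ≤ 1 at h; omega

theorem pvPrio_cand_iff (c cand : String) (k : Nat)
    (h1 : (cand == "question") = false)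
    (h2 : PySem.Str.isIn "question" cand = false)
    (h3 : PySem.List.index? pvCands cand = some k) :
    (PySem.Str.lower c == cand) = true ↔ pvPrio c = 2 + k := by
  rw [pvPrio_eq]
  constructor
  · intro h
    have he : PySem.Str.lower c = cand := by simpa using h
    rw [he, if_neg (by simp only [h1]; exact Bool.false_ne_true), if_neg (by simp only [h2]; exact Bool.false_ne_true), h3]
  · intro h
    split_ifs at h with hα hβ
    · omega
    · omega
    · cases hidx : PySem.List.index? pvCands (PySem.Str.lower c) with
      | none =>
        rw [hidx] at h
        change (6 : Nat) = 2 + k at h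
        obtain ⟨hk', -, -⟩ := PySem.List.getElem_of_index?_eq_some h3
        have : k < 4 := by simpa [pvCands] using hk'
        omega
      | some i =>
        rw [hidx] at h
        change 2 + i = 2 + k at h
        have hik : i = k := by omega
        subst hik
        obtain ⟨hk, hg, -⟩ := PySem.List.getElem_of_index?_eq_some hidx
        obtain ⟨hk', hg', -⟩ := PySem.List.getElem_of_index?_eq_some h3
        simp [hg.symm.trans hg']

def pvFold (c : String) (rest : List String) : String :=
  rest.foldl (fun m x => if pvPrio x < pvPrio m then x else m) c

theorem foldl_some {α : Type} (f : Option α → α → Option α) (g : α → α → α)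
    (hf : ∀ m x, f (some m) x = some (g m x)) :
    ∀ (l : List α) (a : α), l.foldl f (some a) = some (l.foldl g a) := by
  intro l
  induction l with
  | nil => intro a; rfl
  | cons x t ih => intro a; rw [List.foldl_cons, List.foldl_cons, hf]; exact ih _

theorem min?_cons_eq_fold (c : String) (rest : List String) :
    PySem.List.min? (c :: rest) pvPrio = some (pvFold c rest) := by
  show List.foldl _ none (c :: rest) = _
  rw [List.foldl_cons]
  show List.foldl _ (some c) rest = some (pvFold c rest)
  rw [show pvFold c rest = rest.foldl (fun m x => if pvPrio x < pvPrio m then x else m) c from rfl]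
  exact foldl_some _ _
    (fun m x => by
      show (if pvPrio x < pvPrio m then some x else some m) = _
      split_ifs <;> rfl) rest c

theorem fold_find (rest : List String) (c : String) :
    (c :: rest).find? (fun x => pvPrio x == pvM (c :: rest)) = some (pvFold c rest) := by
  induction rest generalizing c with
  | nil =>
    have h : pvM [c] = pvPrio c := by
      rw [pvM_cons, pvM_nil]; have := pvPrio_le c; omega
    simp [pvFold, h]
  | cons x t ih =>
    have hm : pvM (c :: x :: t) = min (pvPrio c) (min (pvPrio x) (pvM t)) := by
      rw [pvM_cons, pvM_cons]
    by_cases hlt : pvPrio x < pvPrio c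
    · -- the accumulator becomes x
      have hmm : pvM (c :: x :: t) = pvM (x :: t) := by rw [hm, pvM_cons]; omega
      have hcne : (pvPrio c == pvM (c :: x :: t)) = false := by
        have := pvM_le (x :: t) x (by simp)
        rw [hmm]; simp; omega
      rw [List.find?_cons_of_neg (by simp only [hcne]; exact Bool.false_ne_true)]
      rw [hmm]
      rw [show pvFold c (x :: t) = pvFold x t from by
        simp only [pvFold, List.foldl_cons, if_pos hlt]]
      exact ih x
    · -- the accumulator stays c
      have hmm : pvM (c :: x :: t) = pvM (c :: t) := by
        rw [hm, pvM_cons]; omega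
      have hfold : pvFold c (x :: t) = pvFold c t := by
        simp only [pvFold, List.foldl_cons, if_neg hlt]
      rw [hmm, hfold]
      by_cases hc : pvPrio c = pvM (c :: t)
      · rw [List.find?_cons_of_pos (by simp [hc])]
        have h2 := ih c
        rw [List.find?_cons_of_pos (by simp [hc])] at h2
        exact h2
      · have hx : (pvPrio x == pvM (c :: t)) = false := by
          have h1 : pvM (c :: t) ≤ pvPrio c := by rw [pvM_cons]; omega
          simp; omega
        rw [List.find?_cons_of_neg (by simp [hc]), List.find?_cons_of_neg (by simp only [hx]; exact Bool.false_ne_true)]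
        have h2 := ih c
        rw [List.find?_cons_of_neg (by simp [hc])] at h2
        exact h2

theorem pvBoolEq {a b : Bool} (h : a = true ↔ b = true) : a = b := by
  cases a <;> cases b <;> simp_all

theorem find_tier (cols : List String) (hne : cols ≠ []) (k : Nat)
    (hlow : ∀ x ∈ cols, ¬ pvPrio x < k)
    (c : String) (hc : cols.find? (fun x => pvPrio x == k) = some c) :
    cols.find? (fun x => pvPrio x == pvM cols) = some c := by
  have hcmem := List.mem_of_find?_eq_some hc
  have hcp : pvPrio c = k := by simpa using List.find?_some hc
  obtain ⟨x0, hx0, hxM⟩ := pvM_attained cols hne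
  have h1 : pvM cols ≤ k := hcp ▸ pvM_le cols c hcmem
  have h2 : k ≤ pvPrio x0 := by have := hlow x0 hx0; omega
  have hM : pvM cols = k := by omega
  rw [hM]; exact hc

theorem A_find (cols : List String) (h : cols ≠ []) :
    cols.find? (fun x => pvPrio x == pvM cols) = some (detect_question_column cols) := by
  unfold detect_question_column
  have e0 : cols.find? (fun c => PySem.Str.lower c == "question")
      = cols.find? (fun c => pvPrio c == 0) :=
    pvFind_congr_mem _ _ _ (fun x _ =>
      pvBoolEq ((pvPrio_eq_zero_iff x).trans (by simp)))
  rw [e0]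
  cases h0 : cols.find? (fun c => pvPrio c == 0) with
  | some c => exact find_tier cols h 0 (by omega) c h0
  | none =>
    have hn0 : ∀ x ∈ cols, pvPrio x ≠ 0 := by
      intro x hx
      have := List.find?_eq_none.mp h0 x hx
      simpa using this
    have e1 : cols.find? (fun c => PySem.Str.isIn "question" (PySem.Str.lower c))
        = cols.find? (fun c => pvPrio c == 1) :=
      pvFind_congr_mem _ _ _ (fun x hx =>
        pvBoolEq ((pvPrio_le_one_iff x).trans (by have := hn0 x hx; rw [beq_iff_eq]; omega)))
    rw [e1]
    cases h1 : cols.find? (fun c => pvPrio c == 1) with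
    | some c => exact find_tier cols h 1 (fun x hx => by have := hn0 x hx; omega) c h1
    | none =>
      have hn1 : ∀ x ∈ cols, 2 ≤ pvPrio x := by
        intro x hx
        have := List.find?_eq_none.mp h1 x hx
        have := hn0 x hx
        simp at *
        omega
      have e2 : ∀ (cand : String) (k : Nat), (cand == "question") = false →
          PySem.Str.isIn "question" cand = false →
          PySem.List.index? pvCands cand = some k →
          cols.find? (fun c => PySem.Str.lower c == cand) = cols.find? (fun c => pvPrio c == 2 + k) :=
        fun cand k a b c' => pvFind_congr_mem _ _ _ (fun x _ =>
          pvBoolEq ((pvPrio_cand_iff x cand k a b c').trans (by simp)))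
      rw [List.findSome?_cons, List.findSome?_cons, List.findSome?_cons, List.findSome?_cons,
        e2 "prompt" 0 (by decide) (by decide) (by decide),
        e2 "input" 1 (by decide) (by decide) (by decide),
        e2 "query" 2 (by decide) (by decide) (by decide),
        e2 "text" 3 (by decide) (by decide) (by decide)]
      cases h2 : cols.find? (fun c => pvPrio c == 2 + 0) with
      | some c => exact find_tier cols h 2 (fun x hx => by have := hn1 x hx; omega) c h2
      | none =>
        have hn2 : ∀ x ∈ cols, pvPrio x ≠ 2 := by
          intro x hx; have := List.find?_eq_none.mp h2 x hx; simpa using this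
        cases h3 : cols.find? (fun c => pvPrio c == 2 + 1) with
        | some c =>
          exact find_tier cols h 3 (fun x hx => by
            have := hn1 x hx; have := hn2 x hx; omega) c h3
        | none =>
          have hn3 : ∀ x ∈ cols, pvPrio x ≠ 3 := by
            intro x hx; have := List.find?_eq_none.mp h3 x hx; simpa using this
          cases h4 : cols.find? (fun c => pvPrio c == 2 + 2) with
          | some c =>
            exact find_tier cols h 4 (fun x hx => by
              have := hn1 x hx; have := hn2 x hx; have := hn3 x hx; omega) c h4
          | none =>
            have hn4 : ∀ x ∈ cols, pvPrio x ≠ 4 := by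
              intro x hx; have := List.find?_eq_none.mp h4 x hx; simpa using this
            cases h5 : cols.find? (fun c => pvPrio c == 2 + 3) with
            | some c =>
              exact find_tier cols h 5 (fun x hx => by
                have := hn1 x hx; have := hn2 x hx; have := hn3 x hx; have := hn4 x hx; omega) c h5
            | none =>
              have hn5 : ∀ x ∈ cols, pvPrio x ≠ 5 := by
                intro x hx; have := List.find?_eq_none.mp h5 x hx; simpa using this
              have h6 : ∀ x ∈ cols, pvPrio x = 6 := by
                intro x hx
                have := pvPrio_le x
                have := hn1 x hx; have := hn2 x hx; have := hn3 x hx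
                have := hn4 x hx; have := hn5 x hx
                omega
              match cols, h with
              | c0 :: rest, _ =>
                simp only [List.findSome?_nil]
                have hM : pvM (c0 :: rest) = 6 := by
                  obtain ⟨x0, hx0, hxM⟩ := pvM_attained (c0 :: rest) (by simp)
                  rw [← hxM]; exact h6 x0 hx0
                rw [hM]
                exact List.find?_cons_of_pos (by simp [h6 c0 (by simp)])

-- ===== VERDICT (by name: the statement is the Claim_ definition above) =====
theorem detect_question_column_spec : Claim_equal_detect_question_column := by
  intro cols _ hpre
  unfold Spec_detect_question_column
  match cols, hpre with
  | c :: rest, _ =>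
    have h1 := A_find (c :: rest) (by simp)
    have h2 := fold_find rest c
    have h3 := min?_cons_eq_fold c rest
    rw [h2] at h1
    simp [detect_question_column_alt, h3]
    exact (Option.some.injEq _ _).mp h1.symm
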